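-- pv_equiv track=rewrite | github.com/glorynino/detection-of-keylogger | core/persistence_check.py | _parse_services_output
-- ===== SOURCE A (Python) =====
-- from typing import Dict, List, Optional, Tuple
--
-- def _parse_services_output(output: str) -> List[Dict]:
--     """Parse la sortie de sc query"""
--     services = []
--     lines = output.split('\n')
--
--     current_service = {}
--     for line in lines:
--         line = line.strip()
--         if line.startswith('SERVICE_NAME:'):
--             if current_service:
--                 services.append(current_service)
--             current_service = {'name': line.split(':', 1)[1].strip()}
--         elif line.startswith('BINARY_PATH_NAME:'):
--             current_service['binary_path'] = line.split(':', 1)[1].strip()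
--         elif line.startswith('DISPLAY_NAME:'):
--             current_service['display_name'] = line.split(':', 1)[1].strip()
--
--     if current_service:
--         services.append(current_service)
--
--     return services
-- ===== SOURCE B (Python) =====
-- from typing import Dict, List, Optional, Tuple
--
-- def _block_to_dict(block):
--     d = {}
--     for line in block:
--         if line.startswith('SERVICE_NAME:'):
--             d['name'] = line.split(':', 1)[1].strip()
--         elif line.startswith('BINARY_PATH_NAME:'):
--             d['binary_path'] = line.split(':', 1)[1].strip()
--         elif line.startswith('DISPLAY_NAME:'):
--             d['display_name'] = line.split(':', 1)[1].strip()
--     return d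
--
-- def _parse_services_output(output: str) -> List[Dict]:
--     """Parse la sortie de sc query (group lines into blocks, then map each block to a dict)."""
--     lines = [l.strip() for l in output.split('\n')]
--     blocks = [[]]
--     for line in lines:
--         if line.startswith('SERVICE_NAME:'):
--             blocks.append([])
--         blocks[-1].append(line)
--     dicts = [_block_to_dict(b) for b in blocks]
--     return [d for d in dicts if d]
-- ===== Notes on version B (the rewrite author's own statement) =====
-- stated objective: alternative
-- what changed: Replaces A's single streaming loop with mutable flush state by a two-pass decomposition: first partition the lines into blocks at each SERVICE_NAME: line, then map each block to its dict and keep the non-empty ones.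
import Mathlib
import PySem

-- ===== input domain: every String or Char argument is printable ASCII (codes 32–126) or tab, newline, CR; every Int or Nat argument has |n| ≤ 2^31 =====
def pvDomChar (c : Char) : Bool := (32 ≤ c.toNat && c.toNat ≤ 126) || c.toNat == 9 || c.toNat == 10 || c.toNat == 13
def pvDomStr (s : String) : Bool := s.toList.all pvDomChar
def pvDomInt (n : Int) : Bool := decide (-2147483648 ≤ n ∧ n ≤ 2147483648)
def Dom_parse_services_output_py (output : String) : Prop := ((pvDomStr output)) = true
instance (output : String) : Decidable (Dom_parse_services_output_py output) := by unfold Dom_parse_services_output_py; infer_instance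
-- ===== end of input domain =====

-- B restructures A's streaming flush loop into a two-pass group-then-map decomposition (objective: alternative).

-- line.split(':', 1)[1].strip(); callers guard line with a prefix containing ':', so index 1 exists
-- and the .getD "" default is unreachable.
def pvAfterColon (line : String) : String :=
  PySem.Str.strip ((PySem.List.pyGet? ((PySem.Str.splitMax? line ":" 1).getD []) 1).getD "")

-- ===== PORT A =====
-- loop body of A: state = (services so far, current_service)
def pvAStep (st : List (List (String × String)) × PySem.Dict String String) (line0 : String) :
    List (List (String × String)) × PySem.Dict String String :=
  let line := PySem.Str.strip line0
  if PySem.Str.startswith line "SERVICE_NAME:" then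
    ((if st.2.items ≠ [] then st.1 ++ [st.2.items] else st.1),
     PySem.Dict.insert PySem.Dict.empty "name" (pvAfterColon line))
  else if PySem.Str.startswith line "BINARY_PATH_NAME:" then
    (st.1, st.2.insert "binary_path" (pvAfterColon line))
  else if PySem.Str.startswith line "DISPLAY_NAME:" then
    (st.1, st.2.insert "display_name" (pvAfterColon line))
  else st

def parse_services_output_py (output : String) : List (List (String × String)) :=
  let lines := (PySem.Str.split? output "\n").getD []
  let st := lines.foldl pvAStep ([], PySem.Dict.empty)
  if st.2.items ≠ [] then st.1 ++ [st.2.items] else st.1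

-- ===== PORT B =====
-- _block_to_dict's loop body
def pvDStep (d : PySem.Dict String String) (line : String) : PySem.Dict String String :=
  if PySem.Str.startswith line "SERVICE_NAME:" then d.insert "name" (pvAfterColon line)
  else if PySem.Str.startswith line "BINARY_PATH_NAME:" then d.insert "binary_path" (pvAfterColon line)
  else if PySem.Str.startswith line "DISPLAY_NAME:" then d.insert "display_name" (pvAfterColon line)
  else d

def pvBlockDict (block : List String) : PySem.Dict String String :=
  block.foldl pvDStep PySem.Dict.empty

-- partition loop body: state = (finished blocks, blocks[-1])
def pvBStep (st : List (List String) × List String) (line : String) :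
    List (List String) × List String :=
  if PySem.Str.startswith line "SERVICE_NAME:" then (st.1 ++ [st.2], [line])
  else (st.1, st.2 ++ [line])

-- the two final comprehensions: map each block to its dict's items, keep the non-empty ones
def pvBOut (blocks : List (List String)) : List (List (String × String)) :=
  (blocks.map (fun b => (pvBlockDict b).items)).filter (fun d => d ≠ [])

def parse_services_output_py_alt (output : String) : List (List (String × String)) :=
  let lines := ((PySem.Str.split? output "\n").getD []).map PySem.Str.strip
  let st := lines.foldl pvBStep ([], [])
  pvBOut (st.1 ++ [st.2])

-- ===== PRECONDITION & SPEC =====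
def Spec_parse_services_output_py (output : String) (out : List (List (String × String))) : Prop := out = parse_services_output_py_alt output
instance (output : String) (out : List (List (String × String))) : Decidable (Spec_parse_services_output_py output out) := by unfold Spec_parse_services_output_py; infer_instance

-- ===== CLAIM (what is proved, stated in full; the proofs are below) =====
def Claim_equal_parse_services_output_py : Prop := ∀ (output : String), Dom_parse_services_output_py output → Spec_parse_services_output_py output (parse_services_output_py output)

-- ===== LEMMAS AND PROOFS =====

lemma pvBOut_append_single (done : List (List String)) (c : List String) :
    pvBOut (done ++ [c]) =
      pvBOut done ++ (if (pvBlockDict c).items ≠ [] then [(pvBlockDict c).items] else []) := by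
  simp only [pvBOut, List.map_append, List.filter_append, List.map_cons, List.map_nil,
    List.filter_cons, List.filter_nil]
  by_cases h : (pvBlockDict c).items = [] <;> simp [h]

lemma pvBlockDict_append_single (b : List String) (s : String) :
    pvBlockDict (b ++ [s]) = pvDStep (pvBlockDict b) s := by
  simp [pvBlockDict, List.foldl_append]

set_option maxHeartbeats 2000000 in
lemma pvKey (lines : List String) (done : List (List String)) (cur : List String) :
    (let st := lines.foldl pvAStep (pvBOut done, pvBlockDict cur)
     if st.2.items ≠ [] then st.1 ++ [st.2.items] else st.1) =
    (let st := (lines.map PySem.Str.strip).foldl pvBStep (done, cur)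
     pvBOut (st.1 ++ [st.2])) := by
  induction lines generalizing done cur with
  | nil =>
      simp only [List.foldl_nil, List.map_nil, pvBOut_append_single]
      by_cases h : (pvBlockDict cur).items = [] <;> simp only [h, ne_eq,
        not_true_eq_false, not_false_eq_true, if_false, if_true, List.append_nil]
  | cons l rest ih =>
      simp only [List.foldl_cons, List.map_cons]
      by_cases h1 : PySem.Str.startswith (PySem.Str.strip l) "SERVICE_NAME:"
      · have hA : pvAStep (pvBOut done, pvBlockDict cur) l =
            (pvBOut (done ++ [cur]), pvBlockDict [PySem.Str.strip l]) := by
          simp only [pvAStep, pvBlockDict, List.foldl_cons, List.foldl_nil, pvDStep, h1,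
            if_true, pvBOut_append_single]
          by_cases h : (pvBlockDict cur).items = [] <;>
            simp only [pvBlockDict] at h <;>
            simp only [h, ne_eq, not_true_eq_false, not_false_eq_true, if_false, if_true,
              List.append_nil]
        have hB : pvBStep (done, cur) (PySem.Str.strip l) = (done ++ [cur], [PySem.Str.strip l]) := by
          simp only [pvBStep, h1, if_true]
        rw [hA, hB]; exact ih (done ++ [cur]) [PySem.Str.strip l]
      · rw [Bool.not_eq_true] at h1
        have hA : pvAStep (pvBOut done, pvBlockDict cur) l =
            (pvBOut done, pvBlockDict (cur ++ [PySem.Str.strip l])) := by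
          rw [pvBlockDict_append_single]
          simp only [pvAStep, pvDStep, h1, Bool.false_eq_true, if_false]
          split_ifs <;> rfl
        have hB : pvBStep (done, cur) (PySem.Str.strip l) = (done, cur ++ [PySem.Str.strip l]) := by
          simp only [pvBStep, h1, Bool.false_eq_true, if_false]
        rw [hA, hB]; exact ih done (cur ++ [PySem.Str.strip l])

-- ===== VERDICT (by name: the statement is the Claim_ definition above) =====
theorem parse_services_output_py_spec : Claim_equal_parse_services_output_py := by
  intro output _
  show parse_services_output_py output = parse_services_output_py_alt output
  unfold parse_services_output_py parse_services_output_py_alt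
  exact pvKey ((PySem.Str.split? output "\n").getD []) [] []
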